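-- pv_equiv track=rewrite | github.com/killenheladagen/aoc | 2024/9/9.py | find_empty_contiguous_slot
-- ===== SOURCE A (Python) =====
-- def next_empty_slot(i, fs):
--     while fs[i] != None:
--         i += 1
--         if i >= len(fs):
--             return None
--     return i
--
-- def contiguous_length_right(i, fs):
--     res = 1
--     x = fs[i]
--     while True:
--         i += 1
--         if i >= len(fs) or x != fs[i]:
--             return res
--         res += 1
--
-- def find_empty_contiguous_slot(space_needed, fs, max_i):
--     i = 0
--     while True:
--         i = next_empty_slot(i, fs)
--         if not i or i > max_i:
--             return None
--         sz = contiguous_length_right(i, fs)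
--         if sz >= space_needed:
--             return i
--         i += sz
-- ===== SOURCE B (Python) =====
-- def find_empty_contiguous_slot(space_needed, fs, max_i):
--     run_start = None
--     run_len = 0
--     for i, v in enumerate(fs):
--         if v is None:
--             if run_len == 0:
--                 if i > max_i:
--                     return None
--                 run_start = i
--             run_len += 1
--             if run_len >= space_needed:
--                 return run_start
--         else:
--             run_len = 0
--     return None
-- ===== Notes on version B (the rewrite author's own statement) =====
-- stated objective: simpler
-- what changed: B replaces A's outer loop over the helper calls next_empty_slot/contiguous_length_right (which re-scan and jump indices) by one plain left-to-right pass that maintains the current empty-run start and length; Pre_ excludes exactly the inputs where A raises IndexError (empty fs, or a scan past a too-short trailing empty run).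
-- intended difference: On inputs whose first cell fs[0] is empty and which contain a qualifying empty run (start <= max_i, length >= space_needed), A returns None because 'if not i' mistakes the index 0 for None, while B returns the leftmost qualifying run start, the intended value. — e.g. on find_empty_contiguous_slot(1, [none], 0): A returns none, B returns some 0
import Mathlib
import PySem

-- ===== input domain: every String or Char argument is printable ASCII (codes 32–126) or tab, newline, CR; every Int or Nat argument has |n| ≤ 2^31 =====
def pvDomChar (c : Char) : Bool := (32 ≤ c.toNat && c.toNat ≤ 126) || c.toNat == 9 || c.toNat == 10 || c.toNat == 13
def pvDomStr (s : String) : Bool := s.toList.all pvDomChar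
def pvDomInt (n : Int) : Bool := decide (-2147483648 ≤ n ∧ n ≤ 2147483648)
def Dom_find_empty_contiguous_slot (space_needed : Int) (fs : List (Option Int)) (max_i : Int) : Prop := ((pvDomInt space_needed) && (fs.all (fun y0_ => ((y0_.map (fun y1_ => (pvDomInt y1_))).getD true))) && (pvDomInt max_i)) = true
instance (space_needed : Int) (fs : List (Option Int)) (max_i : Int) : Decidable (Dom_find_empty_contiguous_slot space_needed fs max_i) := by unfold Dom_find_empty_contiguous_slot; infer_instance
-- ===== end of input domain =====

-- B replaces A's helper-call loop by one left-to-right pass keeping the current empty-run start/length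
-- (same O(n) cost, a simpler decomposition); A=B proved outside D_ (A's 'if not i' index-0 bug), and
-- Pre_ excludes exactly the inputs where A raises IndexError (empty fs / scan past a short trailing empty run).

-- ===== PORT A =====
-- next_empty_slot(i, fs): `none` result encodes the IndexError raised when i >= len(fs) at entry.
-- The while loops are totalized with a fuel argument (fs.length + 1 bounds their iterations).
def nesGo (fs : List (Option Int)) : Nat → Nat → Option (Option Nat)
  | 0, _ => none
  | fuel + 1, i =>
    if i < fs.length then
      if fs.getD i none ≠ none then
        if i + 1 ≥ fs.length then some none
        else nesGo fs fuel (i + 1)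
      else some (some i)
    else none

def nesN (fs : List (Option Int)) (i : Nat) : Option (Option Nat) := nesGo fs (fs.length + 1) i

-- contiguous_length_right's inner while loop (res accumulated as `1 +` per extension).
def clrGo (fs : List (Option Int)) (x : Option Int) : Nat → Nat → Nat
  | 0, _ => 1
  | fuel + 1, i =>
    if i < fs.length then
      if x = fs.getD i none then clrGo fs x fuel (i + 1) + 1 else 1
    else 1

def clrAux (fs : List (Option Int)) (x : Option Int) (i : Nat) : Nat := clrGo fs x (fs.length + 1) i

-- contiguous_length_right(i, fs)
def clr (fs : List (Option Int)) (j : Nat) : Nat := clrAux fs (fs.getD j none) (j + 1)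

-- find_empty_contiguous_slot's outer while loop; `none` encodes the propagated IndexError.
def fecsGo (sn : Int) (fs : List (Option Int)) (mi : Int) : Nat → Nat → Option (Option Int)
  | 0, _ => none
  | fuel + 1, i =>
    match nesN fs i with
    | none => none
    | some none => some none
    | some (some j) =>
      if j = 0 ∨ (j : Int) > mi then some none
      else if (clr fs j : Int) ≥ sn then some (some (j : Int))
      else fecsGo sn fs mi fuel (j + clr fs j)

-- the IndexError case (fecsGo = none) is collapsed by getD; Pre_ excludes those inputs.
def find_empty_contiguous_slot (space_needed : Int) (fs : List (Option Int)) (max_i : Int) : Option Int :=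
  (fecsGo space_needed fs max_i (fs.length + 1) 0).getD none

-- ===== PORT B =====
-- Source B's for-loop; run_start is a Nat seeded with 0 (Source B's None seed is never read while run_len = 0).
def altLoop (sn mi : Int) (l : List (Option Int)) (i rs rl : Nat) : Option Int :=
  match l with
  | [] => none
  | v :: rest =>
    if v = none then
      if rl = 0 then
        if (i : Int) > mi then none
        else if (1 : Int) ≥ sn then some (i : Int)
        else altLoop sn mi rest (i + 1) i 1
      else
        if ((rl : Int) + 1) ≥ sn then some (rs : Int)
        else altLoop sn mi rest (i + 1) rs (rl + 1)
    else altLoop sn mi rest (i + 1) rs 0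

def find_empty_contiguous_slot_alt (space_needed : Int) (fs : List (Option Int)) (max_i : Int) : Option Int :=
  altLoop space_needed max_i fs 0 0 0

-- ===== PRECONDITION & SPEC =====
-- winAt fs j n: the n cells starting at index j all exist and are empty (None)
def winAt (fs : List (Option Int)) (j n : Nat) : Prop :=
  j + n ≤ fs.length ∧ ∀ p < n, fs.getD (j + p) none = none

-- Pre_ excludes exactly the inputs on which A raises IndexError (B returns None on all of them):
-- the empty list, and the lists whose first cell is non-empty that end in a maximal empty run
-- (start t, all cells from t on empty, cell t-1 not) with t ≤ max_i and length shorter than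
-- space_needed, while no empty run of length space_needed exists: there A's scan evaluates fs[len(fs)].
def Pre_find_empty_contiguous_slot (space_needed : Int) (fs : List (Option Int)) (max_i : Int) : Prop :=
  ¬ (fs = [] ∨ ∃ t < fs.length, 1 ≤ t ∧ fs.getD 0 none ≠ none ∧ fs.getD (t - 1) none ≠ none ∧
    (∀ p < fs.length, t ≤ p → fs.getD p none = none) ∧ (t : Int) ≤ max_i ∧
    ((fs.length - t : Nat) : Int) < space_needed ∧ ∀ j < fs.length, ¬ winAt fs j space_needed.toNat)

instance (space_needed : Int) (fs : List (Option Int)) (max_i : Int) : Decidable (Pre_find_empty_contiguous_slot space_needed fs max_i) := by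
  unfold Pre_find_empty_contiguous_slot winAt; infer_instance

def pvWitness_find_empty_contiguous_slot : Int × List (Option Int) × Int := (1, [some 1], 0)

-- On inputs whose first cell fs[0] is empty and which contain a qualifying empty run (start ≤ max_i,
-- length ≥ space_needed), A returns None because 'if not i' mistakes index 0 for None, while B returns
-- the leftmost qualifying run start, the intended value.
def D_find_empty_contiguous_slot (space_needed : Int) (fs : List (Option Int)) (max_i : Int) : Prop :=
  fs.head? = some none ∧ ∃ j < fs.length + 1, (j : Int) ≤ max_i ∧ winAt fs j (max space_needed 1).toNat

instance (space_needed : Int) (fs : List (Option Int)) (max_i : Int) : Decidable (D_find_empty_contiguous_slot space_needed fs max_i) := by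
  unfold D_find_empty_contiguous_slot winAt; infer_instance

def Spec_find_empty_contiguous_slot (space_needed : Int) (fs : List (Option Int)) (max_i : Int) (out : Option Int) : Prop :=
  ¬ D_find_empty_contiguous_slot space_needed fs max_i → out = find_empty_contiguous_slot_alt space_needed fs max_i

instance (space_needed : Int) (fs : List (Option Int)) (max_i : Int) (out : Option Int) : Decidable (Spec_find_empty_contiguous_slot space_needed fs max_i out) := by
  unfold Spec_find_empty_contiguous_slot; infer_instance

def pvDiffWitness_find_empty_contiguous_slot : Int × List (Option Int) × Int := (1, [none], 0)
def pvDiffWitnessOut_find_empty_contiguous_slot : (Option Int) × (Option Int) := (none, some 0)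

-- ===== CLAIM (what is proved, stated in full; the proofs are below) =====
def Claim_unchanged_find_empty_contiguous_slot : Prop := ∀ (space_needed : Int) (fs : List (Option Int)) (max_i : Int), Dom_find_empty_contiguous_slot space_needed fs max_i → Pre_find_empty_contiguous_slot space_needed fs max_i → Spec_find_empty_contiguous_slot space_needed fs max_i (find_empty_contiguous_slot space_needed fs max_i)
def Claim_changed_find_empty_contiguous_slot : Prop := Dom_find_empty_contiguous_slot (pvDiffWitness_find_empty_contiguous_slot.1) (pvDiffWitness_find_empty_contiguous_slot.2.1) (pvDiffWitness_find_empty_contiguous_slot.2.2) ∧ Pre_find_empty_contiguous_slot (pvDiffWitness_find_empty_contiguous_slot.1) (pvDiffWitness_find_empty_contiguous_slot.2.1) (pvDiffWitness_find_empty_contiguous_slot.2.2) ∧ D_find_empty_contiguous_slot (pvDiffWitness_find_empty_contiguous_slot.1) (pvDiffWitness_find_empty_contiguous_slot.2.1) (pvDiffWitness_find_empty_contiguous_slot.2.2) ∧ find_empty_contiguous_slot (pvDiffWitness_find_empty_contiguous_slot.1) (pvDiffWitness_find_empty_contiguous_slot.2.1) (pvDiffWitness_find_empty_contiguous_slot.2.2)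 = pvDiffWitnessOut_find_empty_contiguous_slot.1 ∧ find_empty_contiguous_slot_alt (pvDiffWitness_find_empty_contiguous_slot.1) (pvDiffWitness_find_empty_contiguous_slot.2.1) (pvDiffWitness_find_empty_contiguous_slot.2.2) = pvDiffWitnessOut_find_empty_contiguous_slot.2 ∧ pvDiffWitnessOut_find_empty_contiguous_slot.1 ≠ pvDiffWitnessOut_find_empty_contiguous_slot.2
def Claim_exact_find_empty_contiguous_slot : Prop := ∀ (space_needed : Int) (fs : List (Option Int)) (max_i : Int), Dom_find_empty_contiguous_slot space_needed fs max_i → Pre_find_empty_contiguous_slot space_needed fs max_i → D_find_empty_contiguous_slot space_needed fs max_i → find_empty_contiguous_slot space_needed fs max_i ≠ find_empty_contiguous_slot_alt space_needed fs max_i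

-- ===== LEMMAS AND PROOFS =====

theorem L_drop_step {fs : List (Option Int)} {i : Nat} (h : i < fs.length) :
    fs.drop i = fs.getD i none :: fs.drop (i + 1) := by
  rw [List.getD_eq_getElem fs none h, List.drop_eq_getElem_cons h]

theorem L_nmax (sn : Int) : 1 ≤ (max sn 1).toNat ∧ ((max sn 1).toNat : Int) = max sn 1 := by
  rcases le_total sn 1 with h | h
  · rw [max_eq_right h]; simp
  · rw [max_eq_left h]
    refine ⟨by omega, Int.toNat_of_nonneg (by omega)⟩

theorem fecsGo_eq_endnone {sn mi : Int} {fs : List (Option Int)} {fuel i : Nat} (h : nesN fs i = some none) :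
    fecsGo sn fs mi (fuel + 1) i = some none := by simp only [fecsGo, h]

theorem fecsGo_eq_found {sn mi : Int} {fs : List (Option Int)} {fuel i j : Nat} (h : nesN fs i = some (some j)) :
    fecsGo sn fs mi (fuel + 1) i = if j = 0 ∨ (j : Int) > mi then some none
      else if (clr fs j : Int) ≥ sn then some (some (j : Int))
      else fecsGo sn fs mi fuel (j + clr fs j) := by simp only [fecsGo, h]

theorem clr_pos (fs : List (Option Int)) (j : Nat) : 1 ≤ clr fs j := by
  unfold clr clrAux
  cases h : fs.length + 1 with
  | zero => simp at h
  | succ fuel => simp only [clrGo]; split_ifs <;> omega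

theorem L_nesN_ne_none {fs : List (Option Int)} {i : Nat} (h : i < fs.length) : nesN fs i ≠ none := by
  suffices H : ∀ fuel i, fs.length - i < fuel → i < fs.length → nesGo fs fuel i ≠ none from
    H (fs.length + 1) i (by omega) h
  intro fuel
  induction fuel with
  | zero => intro i hk hi; omega
  | succ fuel ih =>
    intro i hk hi
    simp only [nesGo]
    rw [if_pos hi]
    split_ifs with h2 h3
    · simp
    · exact ih (i + 1) (by omega) (by omega)
    · simp

theorem L_nesN_none {fs : List (Option Int)} {i : Nat} (h : nesN fs i = some none) :
    i < fs.length ∧ ∀ p, i ≤ p → p < fs.length → fs.getD p none ≠ none := by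
  suffices H : ∀ fuel i, fs.length - i < fuel → nesGo fs fuel i = some none →
      i < fs.length ∧ ∀ p, i ≤ p → p < fs.length → fs.getD p none ≠ none from H (fs.length + 1) i (by omega) h
  intro fuel
  induction fuel with
  | zero => intro i hk h; omega
  | succ fuel ih =>
    intro i hk h
    simp only [nesGo] at h
    split_ifs at h with h1 h2 h3
    · refine ⟨h1, fun p hp1 hp2 => ?_⟩
      have : p = i := by omega
      rwa [this]
    · obtain ⟨hl, hall⟩ := ih (i + 1) (by omega) h
      refine ⟨h1, fun p hp1 hp2 => ?_⟩
      rcases Nat.eq_or_lt_of_le hp1 with rfl | hlt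
      · exact h2
      · exact hall p (by omega) hp2
    · simp at h

theorem L_nesN_some {fs : List (Option Int)} {i j : Nat} (h : nesN fs i = some (some j)) :
    i ≤ j ∧ j < fs.length ∧ fs.getD j none = none ∧ ∀ p, i ≤ p → p < j → fs.getD p none ≠ none := by
  suffices H : ∀ fuel i, fs.length - i < fuel → nesGo fs fuel i = some (some j) →
      i ≤ j ∧ j < fs.length ∧ fs.getD j none = none ∧ ∀ p, i ≤ p → p < j → fs.getD p none ≠ none from
    H (fs.length + 1) i (by omega) h
  intro fuel
  induction fuel with
  | zero => intro i hk h; omega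
  | succ fuel ih =>
    intro i hk h
    simp only [nesGo] at h
    split_ifs at h with h1 h2 h3
    · simp at h
    · obtain ⟨hij, hjl, hjn, hall⟩ := ih (i + 1) (by omega) h
      refine ⟨by omega, hjl, hjn, fun p hp1 hp2 => ?_⟩
      rcases Nat.eq_or_lt_of_le hp1 with rfl | hlt
      · exact h2
      · exact hall p (by omega) hp2
    · simp only [Option.some.injEq] at h
      subst h
      push_neg at h2
      exact ⟨le_refl _, h1, h2, fun p hp1 hp2 => by omega⟩

theorem L_clrGo_pos (fs : List (Option Int)) (x : Option Int) (fuel i : Nat) : 1 ≤ clrGo fs x fuel i := by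
  cases fuel with
  | zero => simp [clrGo]
  | succ fuel => simp only [clrGo]; split_ifs <;> omega

theorem L_clrAux_pos (fs : List (Option Int)) (x : Option Int) (i : Nat) : 1 ≤ clrAux fs x i := by
  unfold clrAux; exact L_clrGo_pos fs x _ i

theorem L_clrAux_all {fs : List (Option Int)} : ∀ i p, i ≤ p → p + 1 < i + clrAux fs none i → fs.getD p none = none := by
  suffices H : ∀ fuel i, fs.length - i < fuel → ∀ p, i ≤ p → p + 1 < i + clrGo fs none fuel i → fs.getD p none = none from
    fun i p h1 h2 => H (fs.length + 1) i (by omega) p h1 (by unfold clrAux at h2; exact h2)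
  intro fuel
  induction fuel with
  | zero => intro i hk; omega
  | succ fuel ih =>
    intro i hk p hp1 hp2
    simp only [clrGo] at hp2
    split_ifs at hp2 with h1 h2
    · rcases Nat.eq_or_lt_of_le hp1 with rfl | hlt
      · exact h2.symm
      · exact ih (i + 1) (by omega) p (by omega) (by omega)
    · omega
    · omega

theorem L_clrAux_le {fs : List (Option Int)} : ∀ i, i ≤ fs.length → i + clrAux fs none i ≤ fs.length + 1 := by
  suffices H : ∀ fuel i, fs.length - i < fuel → i ≤ fs.length → i + clrGo fs none fuel i ≤ fs.length + 1 from
    fun i hi => by unfold clrAux; exact H (fs.length + 1) i (by omega) hi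
  intro fuel
  induction fuel with
  | zero => intro i hk; omega
  | succ fuel ih =>
    intro i hk hi
    simp only [clrGo]
    split_ifs with h1 h2
    · have := ih (i + 1) (by omega) (by omega)
      omega
    · omega
    · omega

theorem L_clrAux_end {fs : List (Option Int)} : ∀ i, i ≤ fs.length →
    i + clrAux fs none i - 1 = fs.length ∨ fs.getD (i + clrAux fs none i - 1) none ≠ none := by
  suffices H : ∀ fuel i, fs.length - i < fuel → i ≤ fs.length →
      i + clrGo fs none fuel i - 1 = fs.length ∨ fs.getD (i + clrGo fs none fuel i - 1) none ≠ none from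
    fun i hi => by unfold clrAux; exact H (fs.length + 1) i (by omega) hi
  intro fuel
  induction fuel with
  | zero => intro i hk; omega
  | succ fuel ih =>
    intro i hk hi
    simp only [clrGo]
    split_ifs with h1 h2
    · have := ih (i + 1) (by omega) (by omega)
      have he : i + (clrGo fs none fuel (i + 1) + 1) - 1 = i + 1 + clrGo fs none fuel (i + 1) - 1 := by omega
      rw [he]
      exact this
    · right
      have : i + 1 - 1 = i := by omega
      rw [this]
      exact fun hc => h2 hc.symm
    · left; omega

theorem L_clr_all {fs : List (Option Int)} {j : Nat} (hj : fs.getD j none = none) :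
    ∀ p, j ≤ p → p < j + clr fs j → fs.getD p none = none := by
  intro p hp1 hp2
  unfold clr at hp2
  rw [hj] at hp2
  rcases Nat.eq_or_lt_of_le hp1 with rfl | hlt
  · exact hj
  · exact L_clrAux_all (j + 1) p (by omega) (by omega)

theorem L_clr_le {fs : List (Option Int)} (j : Nat) (hjl : j < fs.length) (hj : fs.getD j none = none) :
    j + clr fs j ≤ fs.length := by
  have := L_clrAux_le (fs := fs) (j + 1) (by omega)
  unfold clr
  rw [hj]
  omega

theorem L_clr_end {fs : List (Option Int)} (j : Nat) (hjl : j < fs.length) (hj : fs.getD j none = none) :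
    j + clr fs j = fs.length ∨ fs.getD (j + clr fs j) none ≠ none := by
  have h1 := L_clrAux_end (fs := fs) (j + 1) (by omega)
  have h2 := L_clrAux_pos fs none (j + 1)
  have he : j + 1 + clrAux fs none (j + 1) - 1 = j + clrAux fs none (j + 1) := by omega
  rw [he] at h1
  unfold clr
  rw [hj]
  exact h1

-- B skips a block of non-empty cells without changing its (fresh) state
theorem S1 {sn mi : Int} {fs : List (Option Int)} : ∀ (k i rs : Nat), (∀ p, i ≤ p → p < i + k → fs.getD p none ≠ none) → i + k ≤ fs.length →
    altLoop sn mi (fs.drop i) i rs 0 = altLoop sn mi (fs.drop (i + k)) (i + k) rs 0 := by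
  intro k
  induction k with
  | zero => intro i rs _ _; rfl
  | succ k ih =>
    intro i rs hall hlen
    have hi : i < fs.length := by omega
    have hne : fs.getD i none ≠ none := hall i (le_refl _) (by omega)
    rw [L_drop_step hi]
    simp only [altLoop]
    rw [if_neg hne]
    rw [show i + (k + 1) = i + 1 + k from by omega]
    exact ih (i + 1) rs (fun p hp1 hp2 => hall p (by omega) (by omega)) (by omega)

theorem S2' {sn mi : Int} {fs : List (Option Int)} {j : Nat} : ∀ (q p rl : Nat), 1 ≤ rl → ((rl : Int) < sn) →
    (∀ p', p ≤ p' → p' < p + q → fs.getD p' none = none) → p + q ≤ fs.length → sn ≤ (rl : Int) + q →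
    altLoop sn mi (fs.drop p) p j rl = some (j : Int) := by
  intro q
  induction q with
  | zero => intro p rl h1 h2 _ _ h5; push_cast at h5; omega
  | succ q ih =>
    intro p rl h1 h2 hall hlen hbig
    have hp : p < fs.length := by omega
    rw [L_drop_step hp]
    simp only [altLoop]
    rw [if_pos (hall p (le_refl _) (by omega))]
    rw [if_neg (by omega : ¬ rl = 0)]
    by_cases hc : ((rl : Int) + 1) ≥ sn
    · rw [if_pos hc]
    · rw [if_neg hc]
      have := ih (p + 1) (rl + 1) (by omega) (by push_cast; omega)
        (fun p' hp1 hp2 => hall p' (by omega) (by omega)) (by omega) (by push_cast; push_cast at hbig; omega)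
      rw [← this]

-- B returns the start of a long-enough empty run
theorem S2 {sn mi : Int} {fs : List (Option Int)} {j m rs : Nat}
    (hall : ∀ p, j ≤ p → p < j + m → fs.getD p none = none) (hm : 1 ≤ m) (hlen : j + m ≤ fs.length)
    (hsn : sn ≤ (m : Int)) (hmi : (j : Int) ≤ mi) :
    altLoop sn mi (fs.drop j) j rs 0 = some (j : Int) := by
  obtain ⟨m', rfl⟩ : ∃ m', m = m' + 1 := ⟨m - 1, by omega⟩
  have hj : j < fs.length := by omega
  rw [L_drop_step hj]
  simp only [altLoop]
  rw [if_pos (hall j (le_refl _) (by omega))]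
  simp only [if_true]
  rw [if_neg (by omega : ¬ (j : Int) > mi)]
  by_cases hc : (1 : Int) ≥ sn
  · rw [if_pos hc]
  · rw [if_neg hc]
    exact S2' m' (j + 1) 1 (le_refl _) (by omega)
      (fun p' hp1 hp2 => hall p' (by omega) (by omega)) (by omega) (by push_cast; push_cast at hsn; omega)

theorem S3' {sn mi : Int} {fs : List (Option Int)} {j : Nat} : ∀ (q p rl : Nat), 1 ≤ rl → ((rl : Int) + q < sn) →
    (∀ p', p ≤ p' → p' < p + q → fs.getD p' none = none) → p + q ≤ fs.length →
    altLoop sn mi (fs.drop p) p j rl = altLoop sn mi (fs.drop (p + q)) (p + q) j (rl + q) := by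
  intro q
  induction q with
  | zero => intro p rl _ _ _ _; rfl
  | succ q ih =>
    intro p rl h1 h2 hall hlen
    have hp : p < fs.length := by omega
    rw [L_drop_step hp]
    simp only [altLoop]
    rw [if_pos (hall p (le_refl _) (by omega))]
    rw [if_neg (by omega : ¬ rl = 0)]
    rw [if_neg (by push_cast at h2 ⊢; omega : ¬ ((rl : Int) + 1) ≥ sn)]
    rw [show p + (q + 1) = p + 1 + q from by omega, show rl + (q + 1) = rl + 1 + q from by omega]
    exact ih (p + 1) (rl + 1) (by omega) (by push_cast; push_cast at h2; omega)
      (fun p' hp1 hp2 => hall p' (by omega) (by omega)) (by omega)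

-- B walks through a too-short empty run
theorem S3 {sn mi : Int} {fs : List (Option Int)} {j sz rs : Nat}
    (hall : ∀ p, j ≤ p → p < j + sz → fs.getD p none = none) (hsz : 1 ≤ sz) (hlen : j + sz ≤ fs.length)
    (hsn : (sz : Int) < sn) (hmi : (j : Int) ≤ mi) :
    altLoop sn mi (fs.drop j) j rs 0 = altLoop sn mi (fs.drop (j + sz)) (j + sz) j sz := by
  obtain ⟨sz', rfl⟩ : ∃ s', sz = s' + 1 := ⟨sz - 1, by omega⟩
  have hj : j < fs.length := by omega
  rw [L_drop_step hj]
  simp only [altLoop]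
  rw [if_pos (hall j (le_refl _) (by omega))]
  simp only [if_true]
  rw [if_neg (by omega : ¬ (j : Int) > mi)]
  rw [if_neg (by push_cast at hsn; omega : ¬ (1 : Int) ≥ sn)]
  rw [show j + (sz' + 1) = j + 1 + sz' from by omega, show sz' + 1 = 1 + sz' from by omega]
  exact S3' (j := j) sz' (j + 1) 1 (le_refl _) (by push_cast; push_cast at hsn; omega)
    (fun p' hp1 hp2 => hall p' (by omega) (by omega)) (by omega)

-- if B returns a slot, a qualifying window exists
theorem L2 {sn mi : Int} {fs : List (Option Int)} {r : Int} : ∀ (k i rs rl : Nat), fs.length - i ≤ k →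
    (1 ≤ rl → ((rs : Int) ≤ mi ∧ rs + rl = i ∧ ∀ p, rs ≤ p → p < i → fs.getD p none = none)) →
    altLoop sn mi (fs.drop i) i rs rl = some r →
    ∃ j < fs.length + 1, (j : Int) ≤ mi ∧ winAt fs j (max sn 1).toNat := by
  intro k
  induction k with
  | zero =>
    intro i rs rl hk _ hsome
    rw [List.drop_eq_nil_of_le (by omega)] at hsome
    simp [altLoop] at hsome
  | succ k ih =>
    intro i rs rl hk hinv hsome
    by_cases hi : i < fs.length
    · rw [L_drop_step hi] at hsome
      simp only [altLoop] at hsome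
      by_cases hv : fs.getD i none = none
      · rw [if_pos hv] at hsome
        by_cases hrl : rl = 0
        · rw [if_pos hrl] at hsome
          by_cases hm : (i : Int) > mi
          · rw [if_pos hm] at hsome; simp at hsome
          · rw [if_neg hm] at hsome
            by_cases hs1 : (1 : Int) ≥ sn
            · refine ⟨i, by omega, by omega, ?_⟩
              have hn : (max sn 1) = 1 := max_eq_right hs1
              rw [hn]
              refine ⟨by simp; omega, fun p hp => ?_⟩
              have : p = 0 := by simpa using hp
              subst this
              simpa using hv
            · rw [if_neg hs1] at hsome
              refine ih (i + 1) i 1 (by omega) ?_ hsome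
              intro _
              refine ⟨by omega, rfl, ?_⟩
              intro p hp1 hp2
              have hpi : p = i := by omega
              rwa [hpi]
        · rw [if_neg hrl] at hsome
          obtain ⟨hrs, hsum, hrun⟩ := hinv (by omega)
          by_cases hb : ((rl : Int) + 1) ≥ sn
          · rw [if_pos hb] at hsome
            refine ⟨rs, by omega, hrs, ?_⟩
            have hle : ((max sn 1).toNat : Int) ≤ (rl : Int) + 1 := by
              rw [(L_nmax sn).2]
              exact max_le (by omega) (by omega)
            refine ⟨by omega, fun p hp => ?_⟩
            have hpi : rs + p ≤ i := by omega
            rcases Nat.eq_or_lt_of_le hpi with he | hlt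
            · rwa [he]
            · exact hrun (rs + p) (by omega) (by omega)
          · rw [if_neg hb] at hsome
            refine ih (i + 1) rs (rl + 1) (by omega) ?_ hsome
            intro _
            refine ⟨hrs, by omega, ?_⟩
            intro p hp1 hp2
            rcases Nat.lt_or_ge p i with h | h
            · exact hrun p hp1 h
            · have hpi : p = i := by omega
              rwa [hpi]
      · rw [if_neg hv] at hsome
        exact ih (i + 1) rs 0 (by omega) (fun h => by omega) hsome
    · rw [List.drop_eq_nil_of_le (by omega)] at hsome
      simp [altLoop] at hsome

-- if B returns None, no qualifying window exists
theorem L3 {sn mi : Int} {fs : List (Option Int)} : ∀ (k i rs rl : Nat), fs.length - i ≤ k →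
    (1 ≤ rl → ((rs : Int) ≤ mi ∧ rs + rl = i ∧ (∀ p, rs ≤ p → p < i → fs.getD p none = none) ∧ (rl : Int) < sn)) →
    altLoop sn mi (fs.drop i) i rs rl = none →
    ∀ (j2 : Nat), (rl = 0 → i ≤ j2) → (1 ≤ rl → rs ≤ j2) → (j2 : Int) ≤ mi → ¬ winAt fs j2 (max sn 1).toNat := by
  intro k
  induction k with
  | zero =>
    intro i rs rl hk hinv _ j2 h0 h1 hmi hw
    obtain ⟨hwl, hwa⟩ := hw
    have hn1 := (L_nmax sn).1
    by_cases hrl : rl = 0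
    · have := h0 hrl; omega
    · obtain ⟨_, hsum, _, hlt⟩ := hinv (by omega)
      have := h1 (by omega)
      have hrn : rl < (max sn 1).toNat := by
        have h2 := (L_nmax sn).2
        have : (rl : Int) < max sn 1 := lt_of_lt_of_le hlt (le_max_left _ _)
        omega
      omega
  | succ k ih =>
    intro i rs rl hk hinv hnone j2 h0 h1 hmi hw
    by_cases hi : i < fs.length
    · rw [L_drop_step hi] at hnone
      simp only [altLoop] at hnone
      by_cases hv : fs.getD i none = none
      · rw [if_pos hv] at hnone
        by_cases hrl : rl = 0
        · rw [if_pos hrl] at hnone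
          by_cases hm : (i : Int) > mi
          · have := h0 hrl
            have : (i : Int) ≤ (j2 : Int) := by omega
            omega
          · rw [if_neg hm] at hnone
            by_cases hs1 : (1 : Int) ≥ sn
            · rw [if_pos hs1] at hnone; simp at hnone
            · rw [if_neg hs1] at hnone
              have hinv' : 1 ≤ (1 : Nat) → ((i : Int) ≤ mi ∧ i + 1 = i + 1 ∧ (∀ p, i ≤ p → p < i + 1 → fs.getD p none = none) ∧ ((1 : Nat) : Int) < sn) := by
                intro _
                refine ⟨by omega, rfl, ?_, by push_cast; omega⟩
                intro p hp1 hp2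
                have hpi : p = i := by omega
                rwa [hpi]
              exact ih (i + 1) i 1 (by omega) hinv' hnone j2 (by omega) (fun _ => by have := h0 hrl; omega) hmi hw
        · rw [if_neg hrl] at hnone
          obtain ⟨hrs, hsum, hrun, hlt⟩ := hinv (by omega)
          by_cases hb : ((rl : Int) + 1) ≥ sn
          · rw [if_pos hb] at hnone; simp at hnone
          · rw [if_neg hb] at hnone
            have hinv' : 1 ≤ rl + 1 → ((rs : Int) ≤ mi ∧ rs + (rl + 1) = i + 1 ∧ (∀ p, rs ≤ p → p < i + 1 → fs.getD p none = none) ∧ ((rl + 1 : Nat) : Int) < sn) := by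
              intro _
              refine ⟨hrs, by omega, ?_, by push_cast; push_cast at hb; omega⟩
              intro p hp1 hp2
              rcases Nat.lt_or_ge p i with h | h
              · exact hrun p hp1 h
              · have hpi : p = i := by omega
                rwa [hpi]
            exact ih (i + 1) rs (rl + 1) (by omega) hinv' hnone j2 (by omega) (fun _ => h1 (by omega)) hmi hw
      · rw [if_neg hv] at hnone
        have hIH := ih (i + 1) rs 0 (by omega) (fun h => by omega) hnone
        rcases Nat.lt_or_ge j2 (i + 1) with hj2 | hj2
        · -- window at j2 ≤ i would cover the non-empty cell i
          obtain ⟨hwl, hwa⟩ := hw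
          have hn1 := (L_nmax sn).1
          have hcov : i - j2 < (max sn 1).toNat := by
            by_cases hrl : rl = 0
            · have := h0 hrl; omega
            · obtain ⟨_, hsum, _, hlt⟩ := hinv (by omega)
              have := h1 (by omega)
              have hrn : rl < (max sn 1).toNat := by
                have h2 := (L_nmax sn).2
                have : (rl : Int) < max sn 1 := lt_of_lt_of_le hlt (le_max_left _ _)
                omega
              omega
          have := hwa (i - j2) hcov
          rw [show j2 + (i - j2) = i by omega] at this
          exact hv this
        · exact hIH j2 (fun _ => hj2) (fun _ => by omega) hmi hw
    · obtain ⟨hwl, hwa⟩ := hw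
      have hn1 := (L_nmax sn).1
      by_cases hrl : rl = 0
      · have := h0 hrl; omega
      · obtain ⟨_, hsum, _, hlt⟩ := hinv (by omega)
        have := h1 (by omega)
        have hrn : rl < (max sn 1).toNat := by
          have h2 := (L_nmax sn).2
          have : (rl : Int) < max sn 1 := lt_of_lt_of_le hlt (le_max_left _ _)
          omega
        omega

-- main simulation: A's outer loop from a fresh non-empty position equals B's fresh scan from there
theorem L1 {sn mi : Int} {fs : List (Option Int)} : ∀ (fuel i rs : Nat), fs.length - i < fuel → i < fs.length →
    fs.getD 0 none ≠ none → fs.getD i none ≠ none → (∀ j' < i, ¬ winAt fs j' sn.toNat) →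
    Pre_find_empty_contiguous_slot sn fs mi →
    fecsGo sn fs mi fuel i = some (altLoop sn mi (fs.drop i) i rs 0) := by
  intro fuel
  induction fuel with
  | zero => intro i rs hk hi _ _ _ _; omega
  | succ fuel ih =>
    intro i rs hk hi h0 hine hNI hpre
    cases hn : nesN fs i with
    | none => exact absurd hn (L_nesN_ne_none hi)
    | some o =>
      cases o with
      | none =>
        obtain ⟨hl, hall⟩ := L_nesN_none hn
        rw [fecsGo_eq_endnone hn]
        have hS := S1 (sn := sn) (mi := mi) (fs.length - i) i rs
          (fun p hp1 hp2 => hall p hp1 (by omega)) (by omega)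
        rw [show i + (fs.length - i) = fs.length by omega] at hS
        rw [hS, List.drop_eq_nil_of_le (le_refl _)]
        rfl
      | some j =>
        obtain ⟨hij, hjlen, hjnone, hnon⟩ := L_nesN_some hn
        have hilt : i < j := by
          rcases Nat.eq_or_lt_of_le hij with rfl | h
          · exact absurd hjnone hine
          · exact h
        have hskip : altLoop sn mi (fs.drop i) i rs 0 = altLoop sn mi (fs.drop j) j rs 0 := by
          have hS := S1 (sn := sn) (mi := mi) (j - i) i rs
            (fun p hp1 hp2 => hnon p hp1 (by omega)) (by omega)
          rwa [show i + (j - i) = j by omega] at hS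
        rw [fecsGo_eq_found hn]
        by_cases hcase : j = 0 ∨ (j : Int) > mi
        · rw [if_pos hcase]
          have hjmi : (j : Int) > mi := by
            rcases hcase with h | h
            · omega
            · exact h
          rw [hskip, L_drop_step hjlen]
          simp only [altLoop]
          rw [if_pos hjnone]
          simp only [if_true]
          rw [if_pos hjmi]
        · rw [if_neg hcase]
          push_neg at hcase
          obtain ⟨hj0, hjmi⟩ := hcase
          have hsz1 : 1 ≤ clr fs j := clr_pos fs j
          have hszle : j + clr fs j ≤ fs.length := L_clr_le j hjlen hjnone
          have hrun : ∀ p, j ≤ p → p < j + clr fs j → fs.getD p none = none := L_clr_all hjnone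
          by_cases hbig : ((clr fs j : Int)) ≥ sn
          · rw [if_pos hbig, hskip]
            rw [S2 hrun hsz1 hszle hbig hjmi]
          · rw [if_neg hbig]
            push_neg at hbig
            have hsn2 : (2 : Int) ≤ sn := by push_cast at hbig; omega
            by_cases hEnd : j + clr fs j = fs.length
            · -- A would index past the end here: excluded by Pre_
              exfalso
              apply hpre
              right
              refine ⟨j, hjlen, by omega, h0, hnon (j - 1) (by omega) (by omega), ?_, hjmi, ?_, ?_⟩
              · intro p hp1 hp2
                exact hrun p hp2 (by omega)
              · push_cast at hbig ⊢
                omega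
              · intro j' hj' hw
                obtain ⟨hwl, hwa⟩ := hw
                have hsntn : (sn.toNat : Int) = sn := Int.toNat_of_nonneg (by omega)
                rcases Nat.lt_or_ge j' i with h | h
                · exact hNI j' h ⟨hwl, hwa⟩
                · rcases Nat.lt_or_ge j' j with h2 | h2
                  · have := hwa 0 (by omega)
                    rw [Nat.add_zero] at this
                    exact hnon j' h h2 this
                  · -- window of sn cells starting in the short trailing run overflows
                    push_cast at hbig
                    omega
            · have hMidne : fs.getD (j + clr fs j) none ≠ none := by
                rcases L_clr_end j hjlen hjnone with h | h
                · exact absurd h hEnd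
                · exact h
              have hMidlt : j + clr fs j < fs.length := by omega
              have hNI' : ∀ j' < j + clr fs j, ¬ winAt fs j' sn.toNat := by
                intro j' hj' hw
                obtain ⟨hwl, hwa⟩ := hw
                have hsntn : (sn.toNat : Int) = sn := Int.toNat_of_nonneg (by omega)
                rcases Nat.lt_or_ge j' i with h | h
                · exact hNI j' h ⟨hwl, hwa⟩
                · rcases Nat.lt_or_ge j' j with h2 | h2
                  · have := hwa 0 (by omega)
                    rw [Nat.add_zero] at this
                    exact hnon j' h h2 this
                  · have hcov : j + clr fs j - j' < sn.toNat := by push_cast at hbig; omega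
                    have := hwa (j + clr fs j - j') hcov
                    rw [show j' + (j + clr fs j - j') = j + clr fs j by omega] at this
                    exact hMidne this
              have hIH := ih (j + clr fs j) j (by omega) hMidlt h0 hMidne hNI' hpre
              rw [hIH]
              congr 1
              rw [hskip, S3 hrun hsz1 hszle hbig hjmi]
              rw [L_drop_step hMidlt]
              simp only [altLoop]
              rw [if_neg hMidne, if_neg hMidne]

-- evaluation of A when the first cell is empty: `if not i` fires and A returns None
theorem L_headA {sn mi : Int} {fs : List (Option Int)} (h : fs.head? = some none) :
    find_empty_contiguous_slot sn fs mi = none := by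
  rcases fs with _ | ⟨v, rest⟩
  · simp at h
  · simp only [List.head?_cons, Option.some.injEq] at h
    subst h
    have hn : nesN (none :: rest) 0 = some (some 0) := by
      simp [nesN, nesGo]
    unfold find_empty_contiguous_slot
    rw [show (none :: rest : List (Option Int)).length + 1 = rest.length + 1 + 1 from by simp]
    rw [fecsGo_eq_found hn]
    simp


-- ===== VERDICT (by name: the statement is the Claim_ definition above) =====
theorem find_empty_contiguous_slot_spec : Claim_unchanged_find_empty_contiguous_slot := by
  unfold Claim_unchanged_find_empty_contiguous_slot
  intro sn fs mi hdom hpre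
  unfold Spec_find_empty_contiguous_slot
  intro hnd
  have hne : fs ≠ [] := by
    intro h
    exact hpre (Or.inl h)
  have hlen : 0 < fs.length := List.length_pos_iff.mpr hne
  unfold find_empty_contiguous_slot_alt
  by_cases hh : fs.head? = some none
  · -- first cell empty: A returns None; ¬D gives that no qualifying window exists, so B returns None too
    have hW : ¬ ∃ j < fs.length + 1, (j : Int) ≤ mi ∧ winAt fs j (max sn 1).toNat := by
      intro hW
      exact hnd ⟨hh, hW⟩
    rw [L_headA hh]
    cases halt : altLoop sn mi fs 0 0 0 with
    | none => rfl
    | some r =>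
      exfalso
      apply hW
      exact L2 fs.length 0 0 0 (by omega) (fun h => absurd h (by omega)) (by rw [List.drop_zero]; exact halt)
  · have hh0 : fs.getD 0 none ≠ none := by
      rcases fs with _ | ⟨v, rest⟩
      · simp at hlen
      · simp only [List.getD_cons_zero]
        intro h
        exact hh (by rw [h]; rfl)
    have := L1 (sn := sn) (mi := mi) (fs.length + 1) 0 0 (by omega) hlen hh0 hh0 (fun j' hj' => absurd hj' (by omega)) hpre
    unfold find_empty_contiguous_slot
    rw [this, List.drop_zero]
    rfl

theorem find_empty_contiguous_slot_changed : Claim_changed_find_empty_contiguous_slot := by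
  unfold Claim_changed_find_empty_contiguous_slot
  decide

theorem find_empty_contiguous_slot_tight : Claim_exact_find_empty_contiguous_slot := by
  unfold Claim_exact_find_empty_contiguous_slot
  intro sn fs mi hdom hpre hd heq
  obtain ⟨hh, j, hjb, hjmi, hwin⟩ := hd
  rw [L_headA hh] at heq
  unfold find_empty_contiguous_slot_alt at heq
  have := L3 (sn := sn) (mi := mi) (fs := fs) fs.length 0 0 0 (by omega) (fun h => absurd h (by omega))
    (by rw [List.drop_zero]; exact heq.symm) j (fun _ => by omega) (fun h => absurd h (by omega)) hjmi
  exact this hwin
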